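-- pv_equiv track=rewrite | github.com/can-keklik/RecipePostagger | POSTaggerFuncs.py | splitSentenceWithSemiColon
-- ===== SOURCE A (Python) =====
-- def splitSentenceWithSemiColon(sentence):
--     retArr = []
--     tmp = []
--     for word in sentence:
--         if ";" not in word:
--             tmp.append(word)
--         else:
--             retArr.append(tmp)
--             tmp = []
--     if len(tmp) > 0:
--         retArr.append(tmp)
--     return retArr
-- ===== SOURCE B (Python) =====
-- def splitSentenceWithSemiColon(sentence):
--     words = list(sentence)
--     breaks = [i for i, w in enumerate(words) if ";" in w]
--     retArr = []
--     start = 0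
--     for b in breaks:
--         retArr.append(words[start:b])
--         start = b + 1
--     if start < len(words):
--         retArr.append(words[start:])
--     return retArr
-- ===== Notes on version B (the rewrite author's own statement) =====
-- stated objective: alternative
-- what changed: Replaces the streaming accumulate-and-flush loop by a two-pass shape: first collect the indices of semicolon tokens, then slice the word list between consecutive break positions, appending the final slice only when nonempty.
import Mathlib
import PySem

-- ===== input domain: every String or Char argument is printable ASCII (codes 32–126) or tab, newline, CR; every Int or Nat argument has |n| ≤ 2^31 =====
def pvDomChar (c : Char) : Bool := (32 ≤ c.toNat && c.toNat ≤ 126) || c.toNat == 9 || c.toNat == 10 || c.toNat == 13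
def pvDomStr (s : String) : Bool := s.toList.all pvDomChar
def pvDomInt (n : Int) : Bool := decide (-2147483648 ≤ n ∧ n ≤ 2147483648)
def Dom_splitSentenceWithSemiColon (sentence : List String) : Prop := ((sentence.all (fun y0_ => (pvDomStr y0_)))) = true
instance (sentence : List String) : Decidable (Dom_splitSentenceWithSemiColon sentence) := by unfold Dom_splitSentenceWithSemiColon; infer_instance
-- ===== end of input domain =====

-- B replaces A's streaming accumulate-and-flush loop by a two-pass shape (collect break
-- indices, then slice between them); same cost, different decomposition (objective: alternative).

-- ===== PORT A =====
-- '";" not in word' is single-character substring search = character membership (exact).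
def splitSentenceWithSemiColon (sentence : List String) : List (List String) :=
  let p := sentence.foldl
    (fun (p : List (List String) × List String) word =>
      if !(word.toList.contains ';') then (p.1, p.2 ++ [word])
      else (p.1 ++ [p.2], []))
    ([], [])
  if p.2.length > 0 then p.1 ++ [p.2] else p.1

-- ===== PORT B =====
-- hand port of Python's enumerate (index starts at k)
def pvEnumFrom (k : Nat) : List String → List (Nat × String)
  | [] => []
  | w :: ws => (k, w) :: pvEnumFrom (k + 1) ws

-- words[start:b] with 0 ≤ start ≤ b is (words.drop start).take (b - start); words[start:] is words.drop start (exact here).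
def splitSentenceWithSemiColon_alt (sentence : List String) : List (List String) :=
  let words := sentence
  let breaks := ((pvEnumFrom 0 words).filter (fun p => p.2.toList.contains ';')).map (·.1)
  let st := breaks.foldl
    (fun (p : List (List String) × Nat) b =>
      (p.1 ++ [(words.drop p.2).take (b - p.2)], b + 1))
    ([], 0)
  if st.2 < words.length then st.1 ++ [words.drop st.2] else st.1

-- ===== PRECONDITION & SPEC =====
def Spec_splitSentenceWithSemiColon (sentence : List String) (out : List (List String)) : Prop := out = splitSentenceWithSemiColon_alt sentence
instance (sentence : List String) (out : List (List String)) : Decidable (Spec_splitSentenceWithSemiColon sentence out) := by unfold Spec_splitSentenceWithSemiColon; infer_instance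

-- ===== CLAIM (what is proved, stated in full; the proofs are below) =====
def Claim_equal_splitSentenceWithSemiColon : Prop := ∀ (sentence : List String), Dom_splitSentenceWithSemiColon sentence → Spec_splitSentenceWithSemiColon sentence (splitSentenceWithSemiColon sentence)

-- ===== LEMMAS AND PROOFS =====

-- common reference function: groups split at semicolon tokens, trailing empty group dropped
def pvF : List String → List (List String)
  | [] => []
  | w :: ws =>
    if w.toList.contains ';' then [] :: pvF ws
    else match pvF ws with
      | [] => [[w]]
      | g :: gs => (w :: g) :: gs

-- A side -----------------------------------------------------------------

def pvG (t : List String) (s : List String) : List (List String) :=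
  match pvF s with
  | [] => if t.isEmpty then [] else [t]
  | g :: gs => (t ++ g) :: gs

lemma pvA_fold (s : List String) : ∀ (r : List (List String)) (t : List String),
    (let p := s.foldl
        (fun (p : List (List String) × List String) word =>
          if !(word.toList.contains ';') then (p.1, p.2 ++ [word])
          else (p.1 ++ [p.2], []))
        (r, t);
     if p.2.length > 0 then p.1 ++ [p.2] else p.1) = r ++ pvG t s := by
  induction s with
  | nil =>
    intro r t
    cases t <;> simp [pvG, pvF]
  | cons w ws ih =>
    intro r t
    by_cases h : ';' ∈ w.toList
    · simp only [List.foldl_cons]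
      rw [show (if !(w.toList.contains ';') then (r, t ++ [w]) else (r ++ [t], ([] : List String)))
            = (r ++ [t], []) by simp [h]]
      rw [ih]
      have h1 : pvG ([] : List String) ws = pvF ws := by
        cases hf : pvF ws <;> simp [pvG, hf]
      have h2 : pvG t (w :: ws) = t :: pvF ws := by
        simp [pvG, pvF, h]
      rw [h1, h2]
      simp
    · simp only [List.foldl_cons]
      rw [show (if !(w.toList.contains ';') then (r, t ++ [w]) else (r ++ [t], ([] : List String)))
            = (r, t ++ [w]) by simp [h]]
      rw [ih]
      congr 1
      cases hf : pvF ws <;> simp [pvG, pvF, h, hf]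

lemma pvA_eq_pvF (s : List String) : splitSentenceWithSemiColon s = pvF s := by
  have hmain := pvA_fold s [] []
  simp only [splitSentenceWithSemiColon]
  rw [hmain]
  cases hf : pvF s <;> simp [pvG, hf]

-- B side -----------------------------------------------------------------

def pvBreaks (k : Nat) (ws : List String) : List Nat :=
  ((pvEnumFrom k ws).filter (fun p => p.2.toList.contains ';')).map (·.1)

def pvStepB (words : List String) (p : List (List String) × Nat) (b : Nat) : List (List String) × Nat :=
  (p.1 ++ [(words.drop p.2).take (b - p.2)], b + 1)

def pvBres (words : List String) (brs : List Nat) (acc : List (List String)) (s : Nat) : List (List String) :=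
  let st := brs.foldl (pvStepB words) (acc, s)
  if st.2 < words.length then st.1 ++ [words.drop st.2] else st.1

lemma pvAlt_eq_pvBres (sentence : List String) :
    splitSentenceWithSemiColon_alt sentence = pvBres sentence (pvBreaks 0 sentence) [] 0 := rfl

lemma pvBreaks_cons (k : Nat) (w : String) (ws : List String) :
    pvBreaks k (w :: ws) = (if ';' ∈ w.toList then [k] else []) ++ pvBreaks (k + 1) ws := by
  by_cases h : ';' ∈ w.toList <;>
    simp [pvBreaks, pvEnumFrom, h]

lemma pvBreaks_shift (ws : List String) : ∀ k, pvBreaks (k + 1) ws = (pvBreaks k ws).map (· + 1) := by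
  induction ws with
  | nil => intro k; simp [pvBreaks, pvEnumFrom]
  | cons w ws ih =>
    intro k
    rw [pvBreaks_cons, pvBreaks_cons, ih (k + 1)]
    by_cases h : ';' ∈ w.toList <;> simp [h]

lemma pvBres_acc (words : List String) (brs : List Nat) :
    ∀ (acc : List (List String)) (s : Nat),
      pvBres words brs acc s = acc ++ pvBres words brs [] s := by
  have key : ∀ (brs : List Nat) (acc : List (List String)) (s : Nat),
      brs.foldl (pvStepB words) (acc, s)
        = (acc ++ (brs.foldl (pvStepB words) ([], s)).1, (brs.foldl (pvStepB words) ([], s)).2) := by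
    intro brs
    induction brs with
    | nil => intro acc s; simp
    | cons b brs ih =>
      intro acc s
      simp only [List.foldl_cons, pvStepB]
      rw [ih (acc ++ [(words.drop s).take (b - s)]) (b + 1),
          ih ([] ++ [(words.drop s).take (b - s)]) (b + 1)]
      simp
  intro acc s
  simp only [pvBres, key brs acc s]
  split <;> simp

lemma pvBres_shift (w : String) (ws : List String) (brs : List Nat) :
    ∀ (acc : List (List String)) (s : Nat),
      pvBres (w :: ws) (brs.map (· + 1)) acc (s + 1) = pvBres ws brs acc s := by
  induction brs with
  | nil =>
    intro acc s
    simp only [pvBres, List.map_nil, List.foldl_nil, List.length_cons]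
    by_cases h : s < ws.length <;> simp [h, List.drop_succ_cons]
  | cons b brs ih =>
    intro acc s
    simp only [List.map_cons, pvBres, List.foldl_cons, pvStepB] at *
    have h1 : (w :: ws).drop (s + 1) = ws.drop s := rfl
    have h2 : b + 1 - (s + 1) = b - s := by omega
    rw [h1, h2]
    exact ih (acc ++ [(ws.drop s).take (b - s)]) (b + 1)

lemma pvBres_eq_pvF (ws : List String) : pvBres ws (pvBreaks 0 ws) [] 0 = pvF ws := by
  induction ws with
  | nil => simp [pvBres, pvBreaks, pvEnumFrom, pvF]
  | cons w ws ih =>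
    rw [pvBreaks_cons, pvBreaks_shift ws 0]
    by_cases h : ';' ∈ w.toList
    · -- delimiter token: first break index is 0
      rw [if_pos h, List.singleton_append]
      have hstep : pvBres (w :: ws) (0 :: (pvBreaks 0 ws).map (· + 1)) [] 0
          = pvBres (w :: ws) ((pvBreaks 0 ws).map (· + 1)) [[]] (0 + 1) := by
        simp [pvBres, pvStepB]
      rw [hstep, pvBres_shift, pvBres_acc, ih]
      simp [pvF, h]
    · rw [if_neg h, List.nil_append]
      cases hbr : pvBreaks 0 ws with
      | nil =>
        rw [hbr] at ih
        have hF : pvF ws = if 0 < ws.length then [ws] else [] := by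
          rw [← ih]; simp [pvBres]
        cases ws with
        | nil => simp [pvBres, pvF, h]
        | cons x xs =>
          have hF' : pvF (x :: xs) = [x :: xs] := by rw [hF]; simp
          rw [pvF, hF']
          simp [pvBres, h]
      | cons b rest =>
        rw [hbr] at ih
        have hstep1 : pvBres ws (b :: rest) [] 0 = pvBres ws rest [ws.take b] (b + 1) := by
          simp [pvBres, pvStepB]
        have hFws : pvF ws = ws.take b :: pvBres ws rest [] (b + 1) := by
          rw [← ih, hstep1, pvBres_acc]; simp
        have hstep2 : pvBres (w :: ws) ((b :: rest).map (· + 1)) [] 0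
            = pvBres (w :: ws) (rest.map (· + 1)) [w :: ws.take b] (b + 1 + 1) := by
          simp [pvBres, pvStepB]
        rw [hstep2, pvBres_shift, pvBres_acc]
        simp [pvF, h, hFws]

lemma pvAlt_eq_pvF (s : List String) : splitSentenceWithSemiColon_alt s = pvF s := by
  rw [pvAlt_eq_pvBres, pvBres_eq_pvF]

-- ===== VERDICT (by name: the statement is the Claim_ definition above) =====
theorem splitSentenceWithSemiColon_spec : Claim_equal_splitSentenceWithSemiColon := by
  intro sentence _
  unfold Spec_splitSentenceWithSemiColon
  rw [pvA_eq_pvF, pvAlt_eq_pvF]
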